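-- pv_equiv track=rewrite | github.com/kyungmin-kang/shared-plan-handoff | src/notion_pm_bridge/coordinator.py | _recovery_done_means
-- ===== SOURCE A (Python) =====
-- def _recovery_done_means(title: str, source_item: str) -> list[str]:
--     normalized = f"{title} {source_item}".lower()
--     bullets = [
--         "the task outcome is reflected consistently in the code, docs, and operator-facing workflow",
--         "the live Notion task status and linked project docs tell the same story as the implementation",
--     ]
--     if "execution-state" in normalized:
--         bullets = [
--             "payloads, endpoints, briefs, UI state, and persistence behavior all agree on the same execution-state contract",
--             "operators and agents can inspect or update execution state without guessing which surface is authoritative",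
--         ]
--     elif any(token in normalized for token in ("guide", "story", "docs", "operator")):
--         bullets = [
--             "README, operator guide, runtime plans, and UI/API behavior describe the same day-to-day workflow",
--             "a human PM can understand what this area does without opening the repo first",
--         ]
--     elif any(token in normalized for token in ("test", "coverage", "validate", "qa")):
--         bullets = [
--             "automated coverage exists for the real shipped workflow, not only prototype behavior",
--             "regressions in this area fail loudly enough that future maintenance stays safe",
--         ]
--     elif any(token in normalized for token in ("run path", "docker", "runtime artifact", "inspectable")):
--         bullets = [
--             "the canonical commands and persisted artifacts are documented, reproducible, and easy to inspect locally",
--             "future contributors can tell which runtime outputs are source-of-truth, generated evidence, or disposable local noise",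
--         ]
--     elif any(token in normalized for token in ("coupling", "prototype", "source-of-truth")):
--         bullets = [
--             "the boundary for this work is explicit enough that future changes remain reviewable",
--             "old or prototype surfaces no longer compete with the maintained v1 path",
--         ]
--     return bullets
-- ===== SOURCE B (Python) =====
-- _GROUP_TOKENS = [
--     ("execution-state",),
--     ("guide", "story", "docs", "operator"),
--     ("test", "coverage", "validate", "qa"),
--     ("run path", "docker", "runtime artifact", "inspectable"),
--     ("coupling", "prototype", "source-of-truth"),
-- ]
--
-- _GROUP_BULLETS = [
--     [
--         "payloads, endpoints, briefs, UI state, and persistence behavior all agree on the same execution-state contract",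
--         "operators and agents can inspect or update execution state without guessing which surface is authoritative",
--     ],
--     [
--         "README, operator guide, runtime plans, and UI/API behavior describe the same day-to-day workflow",
--         "a human PM can understand what this area does without opening the repo first",
--     ],
--     [
--         "automated coverage exists for the real shipped workflow, not only prototype behavior",
--         "regressions in this area fail loudly enough that future maintenance stays safe",
--     ],
--     [
--         "the canonical commands and persisted artifacts are documented, reproducible, and easy to inspect locally",
--         "future contributors can tell which runtime outputs are source-of-truth, generated evidence, or disposable local noise",
--     ],
--     [
--         "the boundary for this work is explicit enough that future changes remain reviewable",
--         "old or prototype surfaces no longer compete with the maintained v1 path",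
--     ],
--     [  # default (index 5): no token matched
--         "the task outcome is reflected consistently in the code, docs, and operator-facing workflow",
--         "the live Notion task status and linked project docs tell the same story as the implementation",
--     ],
-- ]
--
-- # flat (token, group-index) list
-- _TOKENS = [(t, g) for g, toks in enumerate(_GROUP_TOKENS) for t in toks]
--
--
-- def _recovery_done_means(title: str, source_item: str) -> list[str]:
--     normalized = (title + " " + source_item).lower()
--     best = 5  # default slot
--     for token, g in _TOKENS:
--         if token in normalized:
--             best = min(best, g)
--     return _GROUP_BULLETS[best]
-- ===== Notes on version B (the rewrite author's own statement) =====
-- stated objective: alternative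
-- what changed: Instead of an ordered if/elif cascade of group checks, B scans one flat (token, group-index) list, computes the minimum matching group index with min-accumulation, and indexes a bullets table (slot 5 = default); correct because branch precedence equals smallest group index.
import Mathlib
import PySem

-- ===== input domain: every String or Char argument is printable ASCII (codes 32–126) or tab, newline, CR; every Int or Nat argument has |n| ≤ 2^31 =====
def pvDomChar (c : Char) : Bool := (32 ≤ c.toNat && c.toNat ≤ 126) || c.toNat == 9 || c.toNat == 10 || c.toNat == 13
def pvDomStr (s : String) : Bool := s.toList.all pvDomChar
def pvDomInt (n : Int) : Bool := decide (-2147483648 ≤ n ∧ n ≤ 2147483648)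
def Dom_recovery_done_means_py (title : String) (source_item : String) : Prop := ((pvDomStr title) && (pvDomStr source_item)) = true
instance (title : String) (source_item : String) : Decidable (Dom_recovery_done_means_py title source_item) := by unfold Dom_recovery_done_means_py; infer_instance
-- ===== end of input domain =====

-- B replaces the if/elif cascade by computing the minimum matching group index over a flat token list, then indexing a bullets table (alternative formulation, same cost).

-- ===== PORT A =====
def recovery_done_means_py (title : String) (source_item : String) : List String :=
  let normalized := PySem.Str.lower (title ++ " " ++ source_item)
  let bullets : List String := [
    "the task outcome is reflected consistently in the code, docs, and operator-facing workflow",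
    "the live Notion task status and linked project docs tell the same story as the implementation"]
  if PySem.Str.isIn "execution-state" normalized then
    ["payloads, endpoints, briefs, UI state, and persistence behavior all agree on the same execution-state contract",
     "operators and agents can inspect or update execution state without guessing which surface is authoritative"]
  else if (["guide", "story", "docs", "operator"] : List String).any (fun token => PySem.Str.isIn token normalized) then
    ["README, operator guide, runtime plans, and UI/API behavior describe the same day-to-day workflow",
     "a human PM can understand what this area does without opening the repo first"]
  else if (["test", "coverage", "validate", "qa"] : List String).any (fun token => PySem.Str.isIn token normalized) then
    ["automated coverage exists for the real shipped workflow, not only prototype behavior",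
     "regressions in this area fail loudly enough that future maintenance stays safe"]
  else if (["run path", "docker", "runtime artifact", "inspectable"] : List String).any (fun token => PySem.Str.isIn token normalized) then
    ["the canonical commands and persisted artifacts are documented, reproducible, and easy to inspect locally",
     "future contributors can tell which runtime outputs are source-of-truth, generated evidence, or disposable local noise"]
  else if (["coupling", "prototype", "source-of-truth"] : List String).any (fun token => PySem.Str.isIn token normalized) then
    ["the boundary for this work is explicit enough that future changes remain reviewable",
     "old or prototype surfaces no longer compete with the maintained v1 path"]
  else bullets

-- ===== PORT B =====
def rdmGroupBullets : List (List String) := [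
  ["payloads, endpoints, briefs, UI state, and persistence behavior all agree on the same execution-state contract",
   "operators and agents can inspect or update execution state without guessing which surface is authoritative"],
  ["README, operator guide, runtime plans, and UI/API behavior describe the same day-to-day workflow",
   "a human PM can understand what this area does without opening the repo first"],
  ["automated coverage exists for the real shipped workflow, not only prototype behavior",
   "regressions in this area fail loudly enough that future maintenance stays safe"],
  ["the canonical commands and persisted artifacts are documented, reproducible, and easy to inspect locally",
   "future contributors can tell which runtime outputs are source-of-truth, generated evidence, or disposable local noise"],
  ["the boundary for this work is explicit enough that future changes remain reviewable",
   "old or prototype surfaces no longer compete with the maintained v1 path"],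
  -- default (index 5): no token matched
  ["the task outcome is reflected consistently in the code, docs, and operator-facing workflow",
   "the live Notion task status and linked project docs tell the same story as the implementation"]]

-- flat (token, group-index) list (_TOKENS in Source B, written out)
def rdmTokens : List (String × Nat) := [
  ("execution-state", 0),
  ("guide", 1), ("story", 1), ("docs", 1), ("operator", 1),
  ("test", 2), ("coverage", 2), ("validate", 2), ("qa", 2),
  ("run path", 3), ("docker", 3), ("runtime artifact", 3), ("inspectable", 3),
  ("coupling", 4), ("prototype", 4), ("source-of-truth", 4)]

def recovery_done_means_py_alt (title : String) (source_item : String) : List String :=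
  let normalized := PySem.Str.lower (title ++ " " ++ source_item)
  let best := rdmTokens.foldl (fun best p => if PySem.Str.isIn p.1 normalized then min best p.2 else best) 5
  rdmGroupBullets.getD best []

-- ===== PRECONDITION & SPEC =====
def Spec_recovery_done_means_py (title : String) (source_item : String) (out : List String) : Prop := out = recovery_done_means_py_alt title source_item
instance (title : String) (source_item : String) (out : List String) : Decidable (Spec_recovery_done_means_py title source_item out) := by unfold Spec_recovery_done_means_py; infer_instance

-- ===== CLAIM (what is proved, stated in full; the proofs are below) =====
def Claim_equal_recovery_done_means_py : Prop := ∀ (title : String) (source_item : String), Dom_recovery_done_means_py title source_item → Spec_recovery_done_means_py title source_item (recovery_done_means_py title source_item)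

-- ===== LEMMAS AND PROOFS =====
-- min-fold over a run of tokens that all carry the same group index g
theorem rdm_g1 (a g : Nat) (x : Bool) :
    List.foldl (fun a (p : Bool × Nat) => if p.1 then min a p.2 else a) a [(x,g)]
      = if x then min a g else a := by
  cases x <;> simp [List.foldl]

theorem rdm_g3 (a g : Nat) (x y z : Bool) :
    List.foldl (fun a (p : Bool × Nat) => if p.1 then min a p.2 else a) a [(x,g),(y,g),(z,g)]
      = if x || (y || z) then min a g else a := by
  cases x <;> cases y <;> cases z <;> simp [List.foldl]

theorem rdm_g4 (a g : Nat) (x y z w : Bool) :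
    List.foldl (fun a (p : Bool × Nat) => if p.1 then min a p.2 else a) a [(x,g),(y,g),(z,g),(w,g)]
      = if x || (y || (z || w)) then min a g else a := by
  cases x <;> cases y <;> cases z <;> cases w <;> simp [List.foldl]

-- the min-fold over the flat token list, with the 16 match booleans abstracted, equals the cascade's group index
theorem rdm_key (b0 b1 b2 b3 b4 b5 b6 b7 b8 b9 b10 b11 b12 b13 b14 b15 : Bool) :
    List.foldl (fun a (p : Bool × Nat) => if p.1 then min a p.2 else a) 5
      [(b0,0),(b1,1),(b2,1),(b3,1),(b4,1),(b5,2),(b6,2),(b7,2),(b8,2),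
       (b9,3),(b10,3),(b11,3),(b12,3),(b13,4),(b14,4),(b15,4)]
    = (if b0 then 0 else if b1 || (b2 || (b3 || b4)) then 1 else if b5 || (b6 || (b7 || b8)) then 2
       else if b9 || (b10 || (b11 || b12)) then 3 else if b13 || (b14 || b15) then 4 else 5) := by
  rw [show ([(b0,(0:Nat)),(b1,1),(b2,1),(b3,1),(b4,1),(b5,2),(b6,2),(b7,2),(b8,2),
       (b9,3),(b10,3),(b11,3),(b12,3),(b13,4),(b14,4),(b15,4)] : List (Bool × Nat))
      = [(b0,0)] ++ [(b1,1),(b2,1),(b3,1),(b4,1)] ++ [(b5,2),(b6,2),(b7,2),(b8,2)]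
        ++ [(b9,3),(b10,3),(b11,3),(b12,3)] ++ [(b13,4),(b14,4),(b15,4)] from rfl]
  rw [List.foldl_append, List.foldl_append, List.foldl_append, List.foldl_append]
  rw [rdm_g1, rdm_g4, rdm_g4, rdm_g4, rdm_g3]
  split_ifs <;> omega

-- ===== VERDICT (by name: the statement is the Claim_ definition above) =====
theorem recovery_done_means_py_spec : Claim_equal_recovery_done_means_py := by
  intro title source_item _
  unfold Spec_recovery_done_means_py recovery_done_means_py recovery_done_means_py_alt
  set n := PySem.Str.lower (title ++ " " ++ source_item) with hn
  have hmap :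
      rdmTokens.foldl (fun a (p : String × Nat) => if PySem.Str.isIn p.1 n then min a p.2 else a) 5
        = List.foldl (fun a (p : Bool × Nat) => if p.1 then min a p.2 else a) 5
            (rdmTokens.map (fun p => (PySem.Str.isIn p.1 n, p.2))) := by
    rw [List.foldl_map]
  simp only [rdmTokens, List.map] at hmap
  simp only [rdmTokens]
  rw [hmap, rdm_key]
  simp only [List.any_cons, List.any_nil, Bool.or_false]
  split_ifs <;> rfl
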